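-- pv_equiv track=rewrite | github.com/Sourabh1789101/Flames-Game | FLAMES_Tkinter.py | flames_game
-- ===== SOURCE A (Python) =====
-- def remove_common_chars(name1, name2):
--     name1_list = list(name1)
--     name2_list = list(name2)
--
--     for char in name1:
--         if char in name2_list:
--             name1_list.remove(char)
--             name2_list.remove(char)
--
--     return len(name1_list) + len(name2_list)
--
-- def flames_game(player1, player2):
--     count = remove_common_chars(player1, player2)
--     flames = list("FLAMES")
--
--     while len(flames) > 1:
--         split_index = (count % len(flames)) - 1
--         if split_index >= 0:
--             right = flames[split_index + 1:]
--             left = flames[:split_index]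
--             flames = right + left
--         else:
--             flames = flames[:len(flames) - 1]
--
--     return flames[0]
-- ===== SOURCE B (Python) =====
-- # B: keeps A's letter-count phase; replaces the circular-list elimination loop
-- # with the direct Josephus survivor recurrence (objective: simpler).
--
-- def remove_common_chars(name1, name2):
--     name1_list = list(name1)
--     name2_list = list(name2)
--
--     for char in name1:
--         if char in name2_list:
--             name1_list.remove(char)
--             name2_list.remove(char)
--
--     return len(name1_list) + len(name2_list)
--
--
-- def flames_game(player1, player2):
--     count = remove_common_chars(player1, player2)
--     res = 0
--     for i in range(2, 7):
--         res = (res + count) % i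
--     return "FLAMES"[res]
-- ===== Notes on version B (the rewrite author's own statement) =====
-- stated objective: simpler
-- what changed: The letter-count phase is kept; the whole circular-list elimination loop over list('FLAMES') is replaced by the closed Josephus survivor recurrence res=(res+count)%i for i=2..6, which indexes 'FLAMES' directly.
import Mathlib
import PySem

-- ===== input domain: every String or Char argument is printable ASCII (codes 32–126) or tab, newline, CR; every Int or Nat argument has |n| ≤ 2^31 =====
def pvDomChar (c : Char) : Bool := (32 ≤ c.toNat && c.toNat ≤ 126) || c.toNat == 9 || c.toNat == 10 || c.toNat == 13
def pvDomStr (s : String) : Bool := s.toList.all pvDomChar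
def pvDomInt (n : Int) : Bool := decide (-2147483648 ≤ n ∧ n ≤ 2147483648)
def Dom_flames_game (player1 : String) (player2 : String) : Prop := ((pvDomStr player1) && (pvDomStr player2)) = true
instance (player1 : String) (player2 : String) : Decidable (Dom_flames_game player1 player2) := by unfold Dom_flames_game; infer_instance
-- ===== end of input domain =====

-- B keeps A's letter-count phase but replaces the circular-list elimination loop with the
-- direct Josephus survivor recurrence res = (res + count) % i for i = 2..6 (objective: simpler).


-- ===== PORT A =====
-- remove_common_chars: fold over name1's characters mutating the two working lists.
-- Python's list.remove can never raise here (the removed char is always still present), so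
-- the `.getD` fallback of remove? is unreachable.
def removeCommonChars (name1 : String) (name2 : String) : Int :=
  let st := name1.toList.foldl
    (fun (st : List Char × List Char) ch =>
      if st.2.contains ch then
        ((PySem.List.remove? st.1 ch).getD st.1,
         (PySem.List.remove? st.2 ch).getD st.2)
      else st)
    (name1.toList, name2.toList)
  (st.1.length : Int) + (st.2.length : Int)

-- the `while len(flames) > 1` loop; each iteration removes exactly one element, so a fuel of
-- 6 (= len("FLAMES"), the initial list) always runs the loop to completion.
def flamesLoop : Nat → Int → List Char → List Char
  | 0, _, flames => flames
  | fuel+1, count, flames =>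
    if flames.length > 1 then
      flamesLoop fuel count
        (if PySem.Int.mod count (flames.length : Int) - 1 ≥ 0 then
           PySem.List.slice flames (some (PySem.Int.mod count (flames.length : Int) - 1 + 1)) none
             ++ PySem.List.slice flames none (some (PySem.Int.mod count (flames.length : Int) - 1))
         else
           PySem.List.slice flames none (some ((flames.length : Int) - 1)))
    else flames

def flames_game (player1 : String) (player2 : String) : String :=
  let count := removeCommonChars player1 player2
  match PySem.List.pyGet? (flamesLoop 6 count "FLAMES".toList) 0 with
  | some ch => String.ofList [ch]
  | none => ""

-- ===== PORT B =====
-- the `for i in range(2, 7): res = (res + count) % i` recurrence of Source B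
def josRes (count : Int) : Int :=
  (PySem.List.pyRange 2 7 1).foldl (fun res i => PySem.Int.mod (res + count) i) 0

def flames_game_alt (player1 : String) (player2 : String) : String :=
  let count := removeCommonChars player1 player2
  match PySem.Str.pyGet? "FLAMES" (josRes count) with
  | some ch => String.ofList [ch]
  | none => ""

-- ===== PRECONDITION & SPEC =====
def Spec_flames_game (player1 : String) (player2 : String) (out : String) : Prop := out = flames_game_alt player1 player2
instance (player1 : String) (player2 : String) (out : String) : Decidable (Spec_flames_game player1 player2 out) := by unfold Spec_flames_game; infer_instance

-- ===== CLAIM (what is proved, stated in full; the proofs are below) =====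
def Claim_equal_flames_game : Prop := ∀ (player1 : String) (player2 : String), Dom_flames_game player1 player2 → Spec_flames_game player1 player2 (flames_game player1 player2)

-- ===== LEMMAS AND PROOFS =====

-- The recurrence reads `count` only modulo 2..6, all of which divide 60.
lemma josRes_mod60 (c : Int) : josRes c = josRes (c % 60) := by
  have hr : PySem.List.pyRange 2 7 1 = [2,3,4,5,6] := by decide
  unfold josRes
  rw [hr]
  simp only [List.foldl,
    PySem.Int.mod_eq_emod_of_pos (show (0:Int) < 2 by norm_num),
    PySem.Int.mod_eq_emod_of_pos (show (0:Int) < 3 by norm_num),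
    PySem.Int.mod_eq_emod_of_pos (show (0:Int) < 4 by norm_num),
    PySem.Int.mod_eq_emod_of_pos (show (0:Int) < 5 by norm_num),
    PySem.Int.mod_eq_emod_of_pos (show (0:Int) < 6 by norm_num)]
  have e2 : (0 + c % 60) % 2 = (0 + c) % 2 := by omega
  rw [e2]
  have e3 : ((0 + c) % 2 + c % 60) % 3 = ((0 + c) % 2 + c) % 3 := by omega
  rw [e3]
  have e4 : (((0 + c) % 2 + c) % 3 + c % 60) % 4 = (((0 + c) % 2 + c) % 3 + c) % 4 := by omega
  rw [e4]
  have e5 : ((((0 + c) % 2 + c) % 3 + c) % 4 + c % 60) % 5 = ((((0 + c) % 2 + c) % 3 + c) % 4 + c) % 5 := by omega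
  rw [e5]
  have e6 : (((((0 + c) % 2 + c) % 3 + c) % 4 + c) % 5 + c % 60) % 6 = (((((0 + c) % 2 + c) % 3 + c) % 4 + c) % 5 + c) % 6 := by omega
  rw [e6]

-- A's loop reads `count` only modulo the current length 2..6, all of which divide 60;
-- the list shrinks by one element per round, so lengths stay ≤ 6.
lemma flamesLoop_mod60 : ∀ (fuel : Nat) (c : Int) (l : List Char), l.length ≤ 6 →
    flamesLoop fuel c l = flamesLoop fuel (c % 60) l := by
  intro fuel
  induction fuel with
  | zero => intro c l _; rfl
  | succ n ih =>
    intro c l hl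
    by_cases h : l.length > 1
    · have hpos : (0:Int) < (l.length : Int) := by
        exact_mod_cast Nat.lt_of_lt_of_le Nat.zero_lt_one (Nat.le_of_lt h)
      have hm : PySem.Int.mod c (l.length : Int) = PySem.Int.mod (c % 60) (l.length : Int) := by
        have hL : l.length = 2 ∨ l.length = 3 ∨ l.length = 4 ∨ l.length = 5 ∨ l.length = 6 := by omega
        rw [PySem.Int.mod_eq_emod_of_pos hpos, PySem.Int.mod_eq_emod_of_pos hpos]
        rcases hL with hL | hL | hL | hL | hL <;> rw [hL] <;> omega
      simp only [flamesLoop, if_pos h, hm]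
      set si : Int := PySem.Int.mod (c % 60) (l.length : Int) - 1 with hsi
      have hsib : 0 ≤ si + 1 := by
        have := PySem.Int.mod_nonneg (c % 60) hpos
        omega
      apply ih
      by_cases hb : si ≥ 0
      · rw [if_pos hb]
        rw [PySem.List.slice_from _ hsib, PySem.List.slice_to _ (by omega : (0:Int) ≤ si)]
        simp only [List.length_append, List.length_drop, List.length_take]
        omega
      · rw [if_neg hb]
        rw [PySem.List.slice_to _ (by omega : (0:Int) ≤ (l.length : Int) - 1)]
        simp only [List.length_take]
        omega
    · simp only [flamesLoop, if_neg h]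

-- residue sweep: for every residue class mod 60 the two cores agree
lemma sweep : ∀ r : Nat, r < 60 →
    (match PySem.List.pyGet? (flamesLoop 6 ((r : Int)) "FLAMES".toList) 0 with
      | some ch => String.ofList [ch]
      | none => "") =
    (match PySem.Str.pyGet? "FLAMES" (josRes ((r : Int))) with
      | some ch => String.ofList [ch]
      | none => "") := by
  decide

lemma core_eq (c : Int) :
    (match PySem.List.pyGet? (flamesLoop 6 c "FLAMES".toList) 0 with
      | some ch => String.ofList [ch]
      | none => "") =
    (match PySem.Str.pyGet? "FLAMES" (josRes c) with
      | some ch => String.ofList [ch]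
      | none => "") := by
  rw [flamesLoop_mod60 6 c _ (by decide), josRes_mod60]
  have h0 : 0 ≤ c % 60 := Int.emod_nonneg c (by norm_num)
  have h1 : c % 60 < 60 := Int.emod_lt_of_pos c (by norm_num)
  have hc : c % 60 = (((c % 60).toNat : Int)) := (Int.toNat_of_nonneg h0).symm
  rw [hc]
  exact sweep (c % 60).toNat (by omega)

-- ===== VERDICT (by name: the statement is the Claim_ definition above) =====
theorem flames_game_spec : Claim_equal_flames_game := by
  intro player1 player2 _
  unfold Spec_flames_game flames_game flames_game_alt
  exact core_eq (removeCommonChars player1 player2)
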